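-- pv_equiv track=rewrite | github.com/groonvandorp/caseforge-django | api/services.py | _diversify_neighbors
-- ===== SOURCE A (Python) =====
-- from typing import List, Dict, Any
--
-- def _diversify_neighbors(neighbors: List[Dict], max_total: int = 30, max_per_prefix: int = 5) -> List[Dict]:
--     """Diversify neighbors to include cross-category processes"""
--     from collections import defaultdict
--
--     # Group by L1 prefix (e.g., "1", "2", "3")
--     grouped = defaultdict(list)
--     for n in neighbors:
--         prefix = n['code'].split('.')[0]
--         grouped[prefix].append(n)
--
--     # Take up to max_per_prefix from each group
--     diversified = []
--     for prefix in sorted(grouped.keys()):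
--         diversified.extend(grouped[prefix][:max_per_prefix])
--         if len(diversified) >= max_total:
--             break
--
--     return diversified[:max_total]
-- ===== SOURCE B (Python) =====
-- def _diversify_neighbors(neighbors, max_total=30, max_per_prefix=5):
--     """Diversify neighbors to include cross-category processes"""
--     result = []
--     rest = list(neighbors)
--     while rest:
--         p = min(n['code'].split('.')[0] for n in rest)
--         group = [n for n in rest if n['code'].split('.')[0] == p]
--         rest = [n for n in rest if n['code'].split('.')[0] != p]
--         result.extend(group[:max_per_prefix])
--         if len(result) >= max_total:
--             break
--     return result[:max_total]
-- ===== Notes on version B (the rewrite author's own statement) =====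
-- stated objective: alternative
-- what changed: Instead of A's one grouping pass into a defaultdict followed by a loop over sorted keys, B never builds any group index or sorts anything: it repeatedly scans the remaining list for the minimal prefix (a linear min), partitions the list into that prefix's group and the rest, appends the capped group, and loops on the shrunken remainder (selection by minimum, like selection sort over groups).
import Mathlib
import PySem

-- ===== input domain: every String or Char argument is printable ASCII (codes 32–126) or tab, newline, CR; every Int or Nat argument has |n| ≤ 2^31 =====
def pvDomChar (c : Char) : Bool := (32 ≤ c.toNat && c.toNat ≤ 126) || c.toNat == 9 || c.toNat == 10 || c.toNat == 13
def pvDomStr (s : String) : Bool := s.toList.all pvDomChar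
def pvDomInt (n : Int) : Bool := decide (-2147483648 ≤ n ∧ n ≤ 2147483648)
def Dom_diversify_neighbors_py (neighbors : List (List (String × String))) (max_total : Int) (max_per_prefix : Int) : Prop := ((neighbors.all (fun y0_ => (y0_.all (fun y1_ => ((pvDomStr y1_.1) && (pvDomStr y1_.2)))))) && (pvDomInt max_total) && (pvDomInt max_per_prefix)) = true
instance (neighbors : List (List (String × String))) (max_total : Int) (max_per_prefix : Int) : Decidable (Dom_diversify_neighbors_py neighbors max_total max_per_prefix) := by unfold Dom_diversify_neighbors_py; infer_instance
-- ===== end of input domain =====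

-- B drops A's defaultdict grouping and sorted-keys loop entirely: it repeatedly selects the
-- minimal prefix among the remaining neighbors by a linear min scan, partitions the list into
-- that group and the remainder, and appends the capped group (selection-by-minimum); same
-- return value wherever every neighbor dict has a "code" key (elsewhere both Pythons raise KeyError).

-- shared helper: the expression n['code'].split('.')[0] that BOTH Pythons compute
-- (missing 'code' = KeyError in Python, excluded by Pre_; here totalized with "").
-- split('.') never returns an empty list, so headD "" is exact for [0].
def pvCodePrefix (n : List (String × String)) : String :=
  ((PySem.Str.split? (((PySem.Dict.mk n).get? "code").getD "") ".").getD []).headD ""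

-- ===== PORT A =====
-- the 'for prefix in sorted(grouped.keys())' loop with its 'break'
def pvLoopA (grouped : PySem.Dict String (List (List (String × String)))) (max_total max_per_prefix : Int) :
    List String → List (List (String × String)) → List (List (String × String))
  | [], diversified => diversified
  | pfx :: rest, diversified =>
      if max_total ≤ (((diversified ++ PySem.List.slice (grouped.getD pfx []) none (some max_per_prefix)).length : Int)) then
        diversified ++ PySem.List.slice (grouped.getD pfx []) none (some max_per_prefix)
      else
        pvLoopA grouped max_total max_per_prefix rest (diversified ++ PySem.List.slice (grouped.getD pfx []) none (some max_per_prefix))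

def diversify_neighbors_py (neighbors : List (List (String × String))) (max_total : Int) (max_per_prefix : Int) : List (List (String × String)) :=
  -- grouped = defaultdict(list); for n in neighbors: grouped[n['code'].split('.')[0]].append(n)
  let grouped := neighbors.foldl (fun d n => d.modify (pvCodePrefix n) [] (fun g => g ++ [n])) PySem.Dict.empty
  PySem.List.slice (pvLoopA grouped max_total max_per_prefix (PySem.List.sorted grouped.keys (fun k => k)) []) none (some max_total)

-- ===== PORT B =====
-- termination of the while loop: the partition removes at least the element realizing the min
theorem pv_rest_lt (x : List (String × String)) (xs : List (List (String × String))) :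
    ((x :: xs).filter (fun n => !(pvCodePrefix n ==
        ((PySem.List.min? ((x :: xs).map pvCodePrefix) (fun s => s)).getD "")))).length
      < (x :: xs).length := by
  obtain ⟨m, hm⟩ : ∃ m, PySem.List.min? ((x :: xs).map pvCodePrefix) (fun s => s) = some m := by
    cases h : PySem.List.min? ((x :: xs).map pvCodePrefix) (fun s => s) with
    | none => exact absurd ((PySem.List.min?_eq_none_iff _ _).mp h) (by simp)
    | some m => exact ⟨m, rfl⟩
  have hmem : m ∈ (x :: xs).map pvCodePrefix := PySem.List.min?_mem hm
  obtain ⟨n, hn, hpn⟩ := List.mem_map.mp hmem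
  refine List.length_filter_lt_length_iff_exists.mpr ⟨n, hn, ?_⟩
  simp only [List.map_cons] at hm
  simp [hm, hpn]

-- the 'while rest:' loop: min-prefix selection, partition, capped extend, break
def pvLoopB (mt mpp : Int) : List (List (String × String)) → List (List (String × String)) → List (List (String × String))
  | [], result => result
  | x :: xs, result =>
      let p := (PySem.List.min? ((x :: xs).map pvCodePrefix) (fun s => s)).getD ""
      let group := (x :: xs).filter (fun n => pvCodePrefix n == p)
      let rest' := (x :: xs).filter (fun n => !(pvCodePrefix n == p))
      let result' := result ++ PySem.List.slice group none (some mpp)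
      if mt ≤ ((result'.length : Int)) then result'
      else pvLoopB mt mpp rest' result'
termination_by rest _ => rest.length
decreasing_by exact pv_rest_lt x xs

def diversify_neighbors_py_alt (neighbors : List (List (String × String))) (max_total : Int) (max_per_prefix : Int) : List (List (String × String)) :=
  PySem.List.slice (pvLoopB max_total max_per_prefix neighbors []) none (some max_total)

-- ===== PRECONDITION & SPEC =====
-- Pre_ excludes exactly the inputs where some neighbor dict has no 'code' key: there Python A raises KeyError.
def Pre_diversify_neighbors_py (neighbors : List (List (String × String))) (max_total : Int) (max_per_prefix : Int) : Prop :=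
  ∀ n ∈ neighbors, ((PySem.Dict.mk n).get? "code").isSome = true
instance (neighbors : List (List (String × String))) (max_total : Int) (max_per_prefix : Int) : Decidable (Pre_diversify_neighbors_py neighbors max_total max_per_prefix) := by unfold Pre_diversify_neighbors_py; infer_instance

def pvWitness_diversify_neighbors_py : (List (List (String × String))) × Int × Int :=
  ([[("code", "1.2"), ("name", "a")], [("code", "2.5")], [("code", "1.9")]], 30, 5)

def Spec_diversify_neighbors_py (neighbors : List (List (String × String))) (max_total : Int) (max_per_prefix : Int) (out : List (List (String × String))) : Prop := out = diversify_neighbors_py_alt neighbors max_total max_per_prefix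
instance (neighbors : List (List (String × String))) (max_total : Int) (max_per_prefix : Int) (out : List (List (String × String))) : Decidable (Spec_diversify_neighbors_py neighbors max_total max_per_prefix out) := by unfold Spec_diversify_neighbors_py; infer_instance

-- ===== CLAIM (what is proved, stated in full; the proofs are below) =====
def Claim_equal_diversify_neighbors_py : Prop := ∀ (neighbors : List (List (String × String))) (max_total : Int) (max_per_prefix : Int), Dom_diversify_neighbors_py neighbors max_total max_per_prefix → Pre_diversify_neighbors_py neighbors max_total max_per_prefix → Spec_diversify_neighbors_py neighbors max_total max_per_prefix (diversify_neighbors_py neighbors max_total max_per_prefix)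

-- ===== LEMMAS AND PROOFS =====

-- common reference loop: walk a list of groups, extending the capped result, with A/B's break
def pvLoopG (max_total max_per_prefix : Int) :
    List (List (List (String × String))) → List (List (String × String)) → List (List (String × String))
  | [], result => result
  | grp :: rest, result =>
      if max_total ≤ (((result ++ PySem.List.slice grp none (some max_per_prefix)).length : Int)) then
        result ++ PySem.List.slice grp none (some max_per_prefix)
      else
        pvLoopG max_total max_per_prefix rest (result ++ PySem.List.slice grp none (some max_per_prefix))

-- the sorted distinct prefixes of a list
def pvKeys (rest : List (List (String × String))) : List String :=
  PySem.List.sorted (PySem.Set.ofList (rest.map pvCodePrefix)) (fun k => k)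

theorem pv_mem_pvKeys (rest : List (List (String × String))) (k : String) :
    k ∈ pvKeys rest ↔ ∃ n ∈ rest, pvCodePrefix n = k := by
  unfold pvKeys
  rw [PySem.List.mem_sorted, PySem.Set.mem_ofList, List.mem_map]

-- A's key loop equals the group loop once the lookups are listed out
theorem pv_loopA_eq_loopG (d : PySem.Dict String (List (List (String × String)))) (mt mpp : Int)
    (ks : List String) (acc : List (List (String × String))) :
    pvLoopA d mt mpp ks acc = pvLoopG mt mpp (ks.map (fun k => d.getD k [])) acc := by
  induction ks generalizing acc with
  | nil => simp [pvLoopA, pvLoopG]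
  | cons k ks ih =>
      simp only [pvLoopA, pvLoopG, List.map_cons]
      split_ifs with h
      · rfl
      · exact ih _

-- the defaultdict grouping loop: lookup at k is the filter by prefix k
theorem pv_getD_grouped (neighbors : List (List (String × String))) (k : String) :
    (neighbors.foldl (fun d n => d.modify (pvCodePrefix n) [] (fun g => g ++ [n])) PySem.Dict.empty).getD k []
      = neighbors.filter (fun n => pvCodePrefix n == k) := by
  have h := PySem.Dict.getD_foldl_modify_append
    (neighbors.map (fun n => (pvCodePrefix n, n))) PySem.Dict.empty k
  rw [List.foldl_map] at h
  rw [h]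
  simp [List.filter_map, Function.comp_def]

theorem pv_keys_grouped (neighbors : List (List (String × String))) :
    (neighbors.foldl (fun d n => d.modify (pvCodePrefix n) [] (fun g => g ++ [n])) PySem.Dict.empty).keys
      = PySem.Set.ofList (neighbors.map pvCodePrefix) := by
  have h := PySem.Dict.keys_foldl_modify_key neighbors pvCodePrefix []
    (fun _ n => (fun g => g ++ [n])) PySem.Dict.empty
  rw [h, PySem.Dict.keys_empty, PySem.Set.update, PySem.Set.ofList_eq_foldl]

-- selecting the minimal prefix p peels it off the sorted distinct prefixes
theorem pv_pvKeys_cons (x : List (String × String)) (xs : List (List (String × String)))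
    (p : String) (hp : PySem.List.min? ((x :: xs).map pvCodePrefix) (fun s => s) = some p) :
    pvKeys (x :: xs) = p :: pvKeys ((x :: xs).filter (fun n => !(pvCodePrefix n == p))) := by
  have hmin : ∀ y ∈ (x :: xs).map pvCodePrefix, p ≤ y := PySem.List.min?_isMin hp
  have htail_lt : ∀ k ∈ pvKeys ((x :: xs).filter (fun n => !(pvCodePrefix n == p))), p < k := by
    intro k hk
    obtain ⟨n, hn, hpn⟩ := (pv_mem_pvKeys _ k).mp hk
    have hmem := List.mem_of_mem_filter hn
    have hne : pvCodePrefix n ≠ p := by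
      have := List.of_mem_filter hn; simpa using this
    have hle : p ≤ pvCodePrefix n := hmin _ (List.mem_map.mpr ⟨n, hmem, rfl⟩)
    rw [← hpn]
    exact lt_of_le_of_ne hle (fun e => hne e.symm)
  unfold pvKeys
  apply PySem.List.sorted_eq_of_perm_of_pairwise_lt
  · apply (List.perm_ext_iff_of_nodup ?_ ?_).mpr
    · intro k
      constructor
      · intro hk
        rcases List.mem_cons.mp hk with rfl | hk
        · exact (PySem.Set.mem_ofList _ _).mpr (PySem.List.min?_mem hp)
        · obtain ⟨n, hn, hpn⟩ := (pv_mem_pvKeys _ k).mp hk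
          exact (PySem.Set.mem_ofList _ _).mpr
            (List.mem_map.mpr ⟨n, List.mem_of_mem_filter hn, hpn⟩)
      · intro hk
        obtain ⟨n, hn, hpn⟩ := List.mem_map.mp ((PySem.Set.mem_ofList _ _).mp hk)
        by_cases hkp : k = p
        · rw [hkp]; exact List.mem_cons_self
        · refine List.mem_cons_of_mem _ ((pv_mem_pvKeys _ k).mpr ⟨n, ?_, hpn⟩)
          refine List.mem_filter.mpr ⟨hn, ?_⟩
          simp [hpn, hkp]
    · refine List.Pairwise.imp (fun h => ne_of_lt h) ?_
      exact List.pairwise_cons.mpr ⟨htail_lt, PySem.List.sorted_ofList_pairwise_lt _⟩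
    · exact PySem.Set.nodup_ofList _
  · exact List.pairwise_cons.mpr ⟨htail_lt, PySem.List.sorted_ofList_pairwise_lt _⟩

-- removing the p-group does not change the filter at any other prefix k
theorem pv_filter_removed (rest : List (List (String × String))) (p k : String) (hk : k ≠ p) :
    (rest.filter (fun n => !(pvCodePrefix n == p))).filter (fun n => pvCodePrefix n == k)
      = rest.filter (fun n => pvCodePrefix n == k) := by
  rw [List.filter_filter]
  refine List.filter_congr (fun n _ => ?_)
  by_cases h : pvCodePrefix n = k
  · simp [h, hk]
  · simp [h]

-- B's selection loop IS the group loop over the sorted distinct prefixes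
theorem pv_loopB_eq_loopG (mt mpp : Int) :
    ∀ (N : Nat) (rest : List (List (String × String))), rest.length ≤ N →
      ∀ acc, pvLoopB mt mpp rest acc
        = pvLoopG mt mpp ((pvKeys rest).map (fun k => rest.filter (fun n => pvCodePrefix n == k))) acc := by
  intro N
  induction N with
  | zero =>
      intro rest hlen acc
      rw [List.length_eq_zero_iff.mp (Nat.le_zero.mp hlen)]
      simp [pvLoopB, pvLoopG, pvKeys, PySem.Set.ofList, PySem.List.sorted]
  | succ N ih =>
      intro rest hlen acc
      match rest with
      | [] => simp [pvLoopB, pvLoopG, pvKeys, PySem.Set.ofList, PySem.List.sorted]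
      | x :: xs =>
          obtain ⟨p, hp⟩ : ∃ p, PySem.List.min? ((x :: xs).map pvCodePrefix) (fun s => s) = some p := by
            cases h : PySem.List.min? ((x :: xs).map pvCodePrefix) (fun s => s) with
            | none => exact absurd ((PySem.List.min?_eq_none_iff _ _).mp h) (by simp)
            | some m => exact ⟨m, rfl⟩
          rw [pv_pvKeys_cons x xs p hp]
          simp only [List.map_cons] at hp
          simp only [pvLoopB, pvLoopG, List.map_cons, hp, Option.getD_some]
          split_ifs with h
          · rfl
          · rw [ih _ (by
                have := pv_rest_lt x xs
                simp only [List.map_cons, hp, Option.getD_some] at this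
                omega) _]
            congr 1
            refine List.map_congr_left (fun k hk => ?_)
            obtain ⟨n, hn, hpn⟩ := (pv_mem_pvKeys _ k).mp hk
            have hne : k ≠ p := by
              have := List.of_mem_filter hn
              rw [← hpn]; simpa using this
            exact pv_filter_removed (x :: xs) p k hne

-- ===== VERDICT (by name: the statement is the Claim_ definition above) =====
theorem diversify_neighbors_py_spec : Claim_equal_diversify_neighbors_py := by
  intro neighbors max_total max_per_prefix _ _
  unfold Spec_diversify_neighbors_py diversify_neighbors_py diversify_neighbors_py_alt
  dsimp only
  rw [pv_loopA_eq_loopG, pv_keys_grouped,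
    pv_loopB_eq_loopG max_total max_per_prefix neighbors.length neighbors (le_refl _)]
  congr 2
  unfold pvKeys
  refine List.map_congr_left (fun k _ => ?_)
  rw [pv_getD_grouped]
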